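-- pv_equiv track=rewrite | github.com/PiotrWolinski/Python-Daily-Byte | correct_capitalization.py | correct_capitalization
-- ===== SOURCE A (Python) =====
-- def correct_capitalization(string: str) -> bool:
--     letters_capitalized = 0
--     for letter in string:
--         if letter.isupper():
--             letters_capitalized += 1
--
--     if letters_capitalized == len(string) or letters_capitalized == 0:
--         return True
--
--     if string[0].isupper():
--         return True
--
--     return False
-- ===== SOURCE B (Python) =====
-- def correct_capitalization(string: str) -> bool:
--     if not string:
--         return True
--     if string[0].isupper():
--         return True
--     return not any(c.isupper() for c in string)
-- ===== Notes on version B (the rewrite author's own statement) =====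
-- stated objective: simpler
-- what changed: B never counts uppercase letters or compares to len: it returns True immediately when the string is empty or starts with an uppercase letter, and otherwise checks that no character is uppercase with a single short-circuiting any() scan.
import Mathlib
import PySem

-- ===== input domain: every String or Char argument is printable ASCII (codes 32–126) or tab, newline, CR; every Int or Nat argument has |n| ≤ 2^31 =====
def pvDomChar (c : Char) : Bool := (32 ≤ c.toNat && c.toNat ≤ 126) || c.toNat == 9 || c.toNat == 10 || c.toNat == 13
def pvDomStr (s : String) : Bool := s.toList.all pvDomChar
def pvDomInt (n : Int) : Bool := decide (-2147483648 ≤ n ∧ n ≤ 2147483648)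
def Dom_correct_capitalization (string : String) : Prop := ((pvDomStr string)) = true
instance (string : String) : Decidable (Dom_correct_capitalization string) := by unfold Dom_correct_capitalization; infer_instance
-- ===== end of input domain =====

-- B avoids the uppercase count entirely: empty or uppercase-first strings are accepted at once, otherwise no character may be uppercase (simpler decomposition, same O(n) cost).


-- ===== PORT A =====
-- Port of A: count uppercase letters, then test count == len or 0, then string[0].
def correct_capitalization (string : String) : Bool :=
  let letters_capitalized : Int :=
    string.toList.foldl (fun acc letter => if PySem.Chars.isupper letter then acc + 1 else acc) 0
  if letters_capitalized == PySem.Str.len string || letters_capitalized == 0 then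
    true
  else if (PySem.Str.pyGet? string 0).any PySem.Chars.isupper then
    true
  else
    false

-- ===== PORT B =====
-- Port of B: empty or first-char-uppercase => true, else no character may be uppercase.
def correct_capitalization_alt (string : String) : Bool :=
  match string.toList with
  | [] => true
  | c :: _ =>
    if PySem.Chars.isupper c then true
    else !(string.toList.any PySem.Chars.isupper)

-- ===== PRECONDITION & SPEC =====
def Spec_correct_capitalization (string : String) (out : Bool) : Prop := out = correct_capitalization_alt string
instance (string : String) (out : Bool) : Decidable (Spec_correct_capitalization string out) := by unfold Spec_correct_capitalization; infer_instance

-- ===== CLAIM (what is proved, stated in full; the proofs are below) =====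
def Claim_equal_correct_capitalization : Prop := ∀ (string : String), Dom_correct_capitalization string → Spec_correct_capitalization string (correct_capitalization string)

-- ===== LEMMAS AND PROOFS =====

-- ===== VERDICT (by name: the statement is the Claim_ definition above) =====
theorem count_foldl (P : Char → Bool) : ∀ (l : List Char) (n : Int),
    l.foldl (fun acc c => if P c then acc + 1 else acc) n = n + l.countP P := by
  intro l
  induction l with
  | nil => simp
  | cons c cs ih =>
    intro n
    simp only [List.foldl, List.countP_cons, ih]
    split_ifs <;> simp <;> ring

theorem correct_capitalization_spec : Claim_equal_correct_capitalization := by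
  intro s _
  unfold Spec_correct_capitalization correct_capitalization correct_capitalization_alt
  simp only [count_foldl, Int.zero_add, PySem.Str.len]
  cases h : s.toList with
  | nil => simp [h]
  | cons c cs =>
    have hget : PySem.Str.pyGet? s 0 = some c := by
      simp [PySem.Str.pyGet?, h]
    by_cases hc : PySem.Chars.isupper c = true
    · -- first char uppercase: A returns true in either branch
      simp only [hget, h]
      split_ifs with h1 <;> simp_all
    · -- first char not uppercase: count = len is impossible
      have hcf : PySem.Chars.isupper c = false := by simpa using hc
      have hne : ((c :: cs).countP PySem.Chars.isupper : Int) ≠ ((c :: cs).length : Int) := by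
        have hle : (c :: cs).countP PySem.Chars.isupper ≤ cs.length := by
          simp only [List.countP_cons, hcf, Bool.false_eq_true, if_false, Nat.add_zero]
          exact List.countP_le_length
        simp only [List.length_cons]
        omega
      have hany : (c :: cs).any PySem.Chars.isupper = true ↔
          (c :: cs).countP PySem.Chars.isupper ≠ 0 := by
        rw [List.any_eq_true, ← List.countP_pos_iff]
        omega
      simp only [hget, h]
      split_ifs with h1 h2
      · simp only [Bool.or_eq_true, beq_iff_eq] at h1
        rcases h1 with h1 | h1
        · exact absurd h1 hne
        · have h0 : (c :: cs).countP PySem.Chars.isupper = 0 := by exact_mod_cast h1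
          have hall := List.countP_eq_zero.mp h0
          simp [hcf]
          intro x hx
          simpa using hall x (List.mem_cons_of_mem _ hx)
      · simp [hcf] at h2
      · simp only [Bool.or_eq_true, beq_iff_eq, not_or] at h1
        have hn0 : (c :: cs).countP PySem.Chars.isupper ≠ 0 := fun h0 => h1.2 (by simp [h0])
        simp [hcf, hany.mpr hn0]
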